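-- pv_equiv track=rewrite | github.com/AlonMarko/Intro_Python_Course | Wordsearch-Ex5/wordsearch.py | matrix_search
-- ===== SOURCE A (Python) =====
-- def matrix_search(word_list, matrix):
--     """
--     searches the matrix horizontaly and verticaly or diagonaliy
--     (according to the matrix given it does the same search from
--     left to right but the matrix type fits the direction
--     :param word_list: the list to search words from
--     :param matrix: the matrix itself as a list of strings
--     :return: a dictionary containing the word and number of times it appears
--     if it is  1 or more
--     """
--     found_words = {}
--     for word in word_list:
--         word_count = 0
--         len_word = len(word)
--         for i in range(len(matrix)):
--             for j in range(len(matrix[i])):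
--                 if matrix[i][j:j + len_word] == word:
--                     word_count += 1
--         if word_count > 0:
--             found_words[word] = word_count
--     return found_words
-- ===== SOURCE B (Python) =====
-- def matrix_search(word_list, matrix):
--     # Build a substring-occurrence index once (every substring of each row whose
--     # length is some word's length), then answer each word by a single lookup.
--     lengths = {len(w) for w in word_list}
--     subs = [row[j:j + m]
--             for row in matrix
--             for j in range(len(row))
--             for m in lengths
--             if j + m <= len(row)]
--     counts = {}
--     for sub in subs:
--         counts[sub] = counts.get(sub, 0) + 1
--     found_words = {}
--     for w in word_list:
--         c = counts.get(w, 0)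
--         if c > 0:
--             found_words[w] = c
--     return found_words
-- ===== Notes on version B (the rewrite author's own statement) =====
-- stated objective: faster
-- what changed: Instead of rescanning every row position once per word, B builds a substring-occurrence counter once (all row substrings whose length is one of the words' distinct lengths) and answers each word by a single dictionary lookup, removing the per-word factor W in favour of the number K of distinct word lengths.
import Mathlib
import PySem

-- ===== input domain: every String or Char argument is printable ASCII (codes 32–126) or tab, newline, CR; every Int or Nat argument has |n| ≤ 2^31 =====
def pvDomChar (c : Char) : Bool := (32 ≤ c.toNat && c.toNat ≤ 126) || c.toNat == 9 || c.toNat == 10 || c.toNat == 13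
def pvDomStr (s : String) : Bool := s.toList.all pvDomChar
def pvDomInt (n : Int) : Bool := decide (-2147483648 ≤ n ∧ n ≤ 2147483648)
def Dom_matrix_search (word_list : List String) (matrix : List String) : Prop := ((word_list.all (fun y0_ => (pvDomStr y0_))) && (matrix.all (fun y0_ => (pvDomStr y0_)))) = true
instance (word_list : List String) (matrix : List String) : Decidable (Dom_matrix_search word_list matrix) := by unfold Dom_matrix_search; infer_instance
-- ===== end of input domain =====

-- B replaces A's per-word rescans by a substring-occurrence index (a counter of all row substrings of the words' lengths) built once, answering each word by one lookup.


-- ===== PORT A =====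
def matrix_search (word_list : List String) (matrix : List String) : List (String × Int) :=
  (word_list.foldl (fun found_words word =>
      let len_word : Int := PySem.Str.len word
      let word_count : Int :=
        (PySem.List.pyRange 0 (PySem.List.len matrix)).foldl (fun wc i =>
          (PySem.List.pyRange 0 (PySem.Str.len (PySem.List.pyGetD matrix i ""))).foldl (fun wc j =>
            if PySem.Str.slice (PySem.List.pyGetD matrix i "") (some j) (some (j + len_word)) == word
            then wc + 1 else wc) wc) 0
      if word_count > 0 then found_words.insert word word_count else found_words)
    PySem.Dict.empty).items

-- ===== PORT B =====
-- the set of word lengths; the substring list comprehension; a counter over it; one lookup per word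
def matrix_search_alt (word_list : List String) (matrix : List String) : List (String × Int) :=
  let lengths : PySem.Set Int := PySem.Set.ofList (word_list.map PySem.Str.len)
  let subs : List String := matrix.flatMap (fun row =>
    (PySem.List.pyRange 0 (PySem.Str.len row)).flatMap (fun j =>
      (lengths.filter (fun m => decide (j + m ≤ PySem.Str.len row))).map
        (fun m => PySem.Str.slice row (some j) (some (j + m)))))
  let counts : PySem.Dict String Int :=
    subs.foldl (fun d s => d.insert s (d.getD s 0 + 1)) PySem.Dict.empty
  (word_list.foldl (fun found_words w =>
      let c := counts.getD w 0
      if c > 0 then found_words.insert w c else found_words)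
    PySem.Dict.empty).items

-- ===== PRECONDITION & SPEC =====
def Spec_matrix_search (word_list : List String) (matrix : List String) (out : List (String × Int)) : Prop := out = matrix_search_alt word_list matrix
instance (word_list : List String) (matrix : List String) (out : List (String × Int)) : Decidable (Spec_matrix_search word_list matrix out) := by unfold Spec_matrix_search; infer_instance

-- ===== CLAIM (what is proved, stated in full; the proofs are below) =====
def Claim_equal_matrix_search : Prop := ∀ (word_list : List String) (matrix : List String), Dom_matrix_search word_list matrix → Spec_matrix_search word_list matrix (matrix_search word_list matrix)

-- ===== LEMMAS AND PROOFS =====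

-- number of (overlapping) occurrences of w in s: positions j < |s| where w is a prefix of s.drop j
def rowCount (s w : List Char) : Nat :=
  (List.range s.length).countP (fun j => decide (w <+: s.drop j))

theorem slice_eq_word_iff (row w : String) (j m : Nat) (hj : j ≤ row.toList.length) :
    (PySem.Str.slice row (some (j : Int)) (some ((j : Int) + (m : Int))) = w ∧ (j : Int) + (m : Int) ≤ (row.toList.length : Int))
      ↔ ((m : Int) = PySem.Str.len w ∧ w.toList <+: row.toList.drop j) := by
  have hsl : (PySem.Str.slice row (some (j : Int)) (some ((j : Int) + (m : Int)))).toList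
      = (row.toList.drop j).take m := by
    rw [PySem.Str.toList_slice]
    simp only [PySem.Chars.slice_eq_listSlice]
    rw [PySem.List.slice_natCast_add]
  have hlenw : PySem.Str.len w = (w.toList.length : Int) := by simp
  constructor
  · rintro ⟨heq, hle⟩
    have h2 : (row.toList.drop j).take m = w.toList := by rw [← hsl, heq]
    have hlen : m = w.toList.length := by
      have := congrArg List.length h2
      simp only [List.length_take, List.length_drop] at this
      omega
    refine ⟨by rw [hlenw]; exact_mod_cast hlen, ?_⟩
    rw [List.prefix_iff_eq_take, ← hlen]
    exact h2.symm
  · rintro ⟨hm, hpre⟩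
    have hlen : m = w.toList.length := by rw [hlenw] at hm; exact_mod_cast hm
    have hwle : w.toList.length ≤ (row.toList.drop j).length := hpre.length_le
    simp only [List.length_drop] at hwle
    refine ⟨?_, by omega⟩
    apply String.toList_inj.mp
    rw [hsl, hlen]
    exact (List.prefix_iff_eq_take.mp hpre).symm

theorem count_pos_list (word_list : List String) (row w : String) (j : Nat)
    (hw : w ∈ word_list) (hj : j ≤ row.toList.length) :
    (((PySem.Set.ofList (word_list.map PySem.Str.len)).filter
        (fun m => decide ((j : Int) + m ≤ PySem.Str.len row))).map
      (fun m => PySem.Str.slice row (some (j : Int)) (some ((j : Int) + m)))).count w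
      = if w.toList <+: row.toList.drop j then 1 else 0 := by
  have hnd : (PySem.Set.ofList (word_list.map PySem.Str.len)).Nodup :=
    PySem.Set.nodup_ofList _
  have hmem : PySem.Str.len w ∈ PySem.Set.ofList (word_list.map PySem.Str.len) := by
    rw [PySem.Set.mem_ofList]
    exact List.mem_map_of_mem hw
  rw [show ∀ (l : List Int) (f : Int → String),
        (l.map f).count w = l.countP (fun m => f m == w) from by
      intro l f; simp [List.count_eq_countP, List.countP_map, Function.comp_def]]
  rw [List.countP_filter]
  have hpt : ∀ m ∈ PySem.Set.ofList (word_list.map PySem.Str.len),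
      ((PySem.Str.slice row (some (j : Int)) (some ((j : Int) + m)) == w)
        && decide ((j : Int) + m ≤ PySem.Str.len row))
      = (decide (m = PySem.Str.len w) && decide (w.toList <+: row.toList.drop j)) := by
    intro m hm
    rw [PySem.Set.mem_ofList] at hm
    obtain ⟨u, _, rfl⟩ := List.mem_map.mp hm
    have h0 : (0 : Int) ≤ PySem.Str.len u := by simp
    have hcast : PySem.Str.len u = (((PySem.Str.len u).toNat : Nat) : Int) := by omega
    rw [hcast]
    have hiff := slice_eq_word_iff row w j (PySem.Str.len u).toNat hj
    have hlen : PySem.Str.len row = (row.toList.length : Int) := by simp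
    rw [hlen]
    apply Bool.eq_iff_iff.mpr
    simp only [Bool.and_eq_true, beq_iff_eq, decide_eq_true_eq]
    exact hiff
  have hcong := List.countP_congr
      (l := PySem.Set.ofList (word_list.map PySem.Str.len))
      (p := fun m => (PySem.Str.slice row (some (j : Int)) (some ((j : Int) + m)) == w)
        && decide ((j : Int) + m ≤ PySem.Str.len row))
      (q := fun m => decide (m = PySem.Str.len w) && decide (w.toList <+: row.toList.drop j))
      (fun m hm => by simp only [hpt m hm])
  rw [hcong]
  by_cases hpre : w.toList <+: row.toList.drop j
  · rw [if_pos hpre]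
    have : List.countP (fun m => decide (m = PySem.Str.len w) && decide (w.toList <+: row.toList.drop j))
        (PySem.Set.ofList (word_list.map PySem.Str.len))
        = List.count (PySem.Str.len w) (PySem.Set.ofList (word_list.map PySem.Str.len)) := by
      simp only [hpre, decide_true, Bool.and_true, List.count_eq_countP]
      apply List.countP_congr
      intro x hx
      rw [Bool.eq_iff_iff]
      simp only [beq_iff_eq, decide_eq_true_eq]
      exact iff_true_right trivial
    rw [this]
    exact List.count_eq_one_of_mem hnd hmem
  · simp [hpre]

theorem count_row_list (word_list : List String) (row w : String) (hw : w ∈ word_list) :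
    ((PySem.List.pyRange 0 (PySem.Str.len row)).flatMap (fun j =>
        ((PySem.Set.ofList (word_list.map PySem.Str.len)).filter
            (fun m => decide (j + m ≤ PySem.Str.len row))).map
          (fun m => PySem.Str.slice row (some j) (some (j + m))))).count w
      = rowCount row.toList w.toList := by
  rw [List.flatMap_def, List.count_flatten, List.map_map]
  have hl : PySem.Str.len row = ((row.toList.length : Nat) : Int) := by simp
  rw [hl, PySem.List.pyRange_zero_natCast, List.map_map]
  simp only [Function.comp_def]
  rw [← hl]
  have hpt : ∀ k ∈ List.range row.toList.length,
      List.count w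
        (((PySem.Set.ofList (word_list.map PySem.Str.len)).filter
            (fun m => decide ((k : Int) + m ≤ PySem.Str.len row))).map
          (fun m => PySem.Str.slice row (some (k : Int)) (some ((k : Int) + m))))
        = if decide (w.toList <+: row.toList.drop k) = true then 1 else 0 := by
    intro k hk
    have hk' : k ≤ row.toList.length := le_of_lt (List.mem_range.mp hk)
    rw [count_pos_list word_list row w k hw hk']
    simp
  rw [List.map_congr_left hpt]
  rw [PySem.List.sum_map_ite_one_zero_nat]
  rfl

theorem innerA_eq_rowCount (row word : String) (wc : Int) :
    (PySem.List.pyRange 0 (PySem.Str.len row)).foldl (fun wc j =>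
        if PySem.Str.slice row (some j) (some (j + PySem.Str.len word)) == word
        then wc + 1 else wc) wc
      = wc + (rowCount row.toList word.toList : Int) := by
  unfold rowCount
  have hl : PySem.Str.len row = ((row.toList.length : Nat) : Int) := by simp
  rw [hl, PySem.List.pyRange_zero_natCast, List.foldl_map, PySem.List.foldl_count_if]
  congr 1
  norm_cast
  apply List.countP_congr
  intro k _
  have hm : PySem.Str.len word = ((word.toList.length : Nat) : Int) := by simp
  rw [hm]
  have hiff : PySem.Str.slice row (some (k : Int)) (some ((k : Int) + (word.toList.length : Int))) = word
      ↔ word.toList <+: row.toList.drop k := by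
    constructor
    · intro h
      rw [List.prefix_iff_eq_take]
      have h2 := congrArg String.toList h
      rw [PySem.Str.toList_slice] at h2
      simp only [PySem.Chars.slice_eq_listSlice] at h2
      rw [PySem.List.slice_natCast_add] at h2
      exact h2.symm
    · intro h
      apply String.toList_inj.mp
      rw [PySem.Str.toList_slice]
      simp only [PySem.Chars.slice_eq_listSlice]
      rw [PySem.List.slice_natCast_add]
      exact (List.prefix_iff_eq_take.mp h).symm
  rw [show ((word.toList.length : Nat) : Int) = ((word.length : Nat) : Int) from by simp] at hiff
  simp [hiff]

theorem word_count_eq (word_list : List String) (matrix : List String) (w : String) (hw : w ∈ word_list) :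
    (PySem.List.pyRange 0 (PySem.List.len matrix)).foldl (fun wc i =>
      (PySem.List.pyRange 0 (PySem.Str.len (PySem.List.pyGetD matrix i ""))).foldl (fun wc j =>
        if PySem.Str.slice (PySem.List.pyGetD matrix i "") (some j) (some (j + PySem.Str.len w)) == w
        then wc + 1 else wc) wc) 0
    = ((matrix.flatMap (fun row =>
        (PySem.List.pyRange 0 (PySem.Str.len row)).flatMap (fun j =>
          ((PySem.Set.ofList (word_list.map PySem.Str.len)).filter
              (fun m => decide (j + m ≤ PySem.Str.len row))).map
            (fun m => PySem.Str.slice row (some j) (some (j + m)))))).count w : Int) := by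
  rw [PySem.List.foldl_pyRange_pyGetD matrix ""
      (fun acc row => (PySem.List.pyRange 0 (PySem.Str.len row)).foldl (fun wc j =>
        if PySem.Str.slice row (some j) (some (j + PySem.Str.len w)) == w
        then wc + 1 else wc) acc) 0 le_rfl]
  simp only [Int.toNat_zero, List.drop_zero]
  have h1 : matrix.foldl (fun acc row => (PySem.List.pyRange 0 (PySem.Str.len row)).foldl (fun wc j =>
        if PySem.Str.slice row (some j) (some (j + PySem.Str.len w)) == w
        then wc + 1 else wc) acc) 0
      = matrix.foldl (fun acc row => acc + ((rowCount row.toList w.toList : Nat) : Int)) 0 := by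
    apply PySem.List.foldl_congr_mem
    intro acc row _
    rw [innerA_eq_rowCount]
  rw [h1, PySem.List.foldl_add, List.flatMap_def, List.count_flatten, List.map_map]
  have h2 : ∀ row ∈ matrix,
      (List.count w ∘ fun row =>
        (PySem.List.pyRange 0 (PySem.Str.len row)).flatMap (fun j =>
          ((PySem.Set.ofList (word_list.map PySem.Str.len)).filter
              (fun m => decide (j + m ≤ PySem.Str.len row))).map
            (fun m => PySem.Str.slice row (some j) (some (j + m))))) row
      = rowCount row.toList w.toList := by
    intro row _
    simp only [Function.comp_apply]
    exact count_row_list word_list row w hw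
  rw [List.map_congr_left h2]
  push_cast
  simp [Function.comp_def]

-- ===== VERDICT (by name: the statement is the Claim_ definition above) =====
theorem matrix_search_spec : Claim_equal_matrix_search := by
  intro word_list matrix _
  unfold Spec_matrix_search matrix_search matrix_search_alt
  dsimp only
  congr 1
  apply PySem.List.foldl_congr_mem
  intro acc w hw
  dsimp only
  rw [word_count_eq word_list matrix w hw]
  rw [PySem.Dict.getD_foldl_insert_add_one, PySem.Dict.getD_empty, zero_add]
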